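-- pv_equiv track=rewrite | github.com/Hoonst/algorithm | Samsung_Special/21609_middle_shark.py | rainbow_block
-- ===== SOURCE A (Python) =====
-- def rainbow_block(blocks):
--     max_zero_block = 0
--     rainbow = []
--     for block in blocks:
--         zero_block = len([i for i in block if i[-1] == 0])
--         if zero_block > max_zero_block:
--             max_zero_block = zero_block
--
--     for block in blocks:
--         if len([i for i in block if i[-1] == 0]) == max_zero_block:
--             rainbow.append(block)
--
--     return rainbow
-- ===== SOURCE B (Python) =====
-- def rainbow_block(blocks):
--     best = 0
--     winners = []
--     for block in blocks:
--         c = 0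
--         for cell in block:
--             if cell[-1] == 0:
--                 c += 1
--         if c > best:
--             best = c
--             winners = [block]
--         elif c == best:
--             winners.append(block)
--     return winners
-- ===== Notes on version B (the rewrite author's own statement) =====
-- stated objective: alternative
-- what changed: Single streaming pass keeping a running (best, winners) pair that resets the winner list whenever a strictly larger zero-count appears, instead of A's two staged full scans (one to find the max, one to filter, each recomputing the counts).
import Mathlib
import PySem

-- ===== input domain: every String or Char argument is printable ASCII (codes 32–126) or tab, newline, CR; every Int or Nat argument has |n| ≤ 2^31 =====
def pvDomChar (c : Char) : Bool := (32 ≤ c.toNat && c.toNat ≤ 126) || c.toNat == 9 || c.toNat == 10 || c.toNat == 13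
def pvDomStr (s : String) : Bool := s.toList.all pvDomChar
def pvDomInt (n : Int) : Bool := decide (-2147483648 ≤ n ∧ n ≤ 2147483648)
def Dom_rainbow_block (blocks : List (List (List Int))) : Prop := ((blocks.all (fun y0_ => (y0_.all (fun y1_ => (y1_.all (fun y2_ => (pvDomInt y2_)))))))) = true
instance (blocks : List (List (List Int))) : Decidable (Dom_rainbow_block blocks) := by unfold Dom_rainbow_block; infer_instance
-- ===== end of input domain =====

-- B replaces A's two staged scans (max pass + filter pass, each recomputing the zero-count)
-- by ONE streaming pass over blocks keeping a running (best, winners) pair that resets the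
-- winner list whenever a strictly larger zero-count appears; objective: alternative.

-- ===== PORT A =====
-- zero_block = len([i for i in block if i[-1] == 0])
def pvCntA (block : List (List Int)) : Nat :=
  (block.filter (fun i => PySem.List.pyGet? i (-1) == some 0)).length

def rainbow_block (blocks : List (List (List Int))) : List (List (List Int)) :=
  let max_zero_block := blocks.foldl
    (fun m block => let zero_block := pvCntA block
                    if zero_block > m then zero_block else m) 0
  blocks.foldl
    (fun rainbow block =>
      if pvCntA block = max_zero_block then rainbow ++ [block] else rainbow) []

-- ===== PORT B =====
-- inner loop: c = 0; for cell in block: if cell[-1] == 0: c += 1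
def pvCntB (block : List (List Int)) : Nat :=
  block.foldl (fun c cell => if PySem.List.pyGet? cell (-1) == some 0 then c + 1 else c) 0

-- one step of the streaming pass: reset winners on a strictly larger count, append on a tie
def pvStepB (st : Nat × List (List (List Int))) (block : List (List Int)) :
    Nat × List (List (List Int)) :=
  let c := pvCntB block
  if c > st.1 then (c, [block])
  else if c = st.1 then (st.1, st.2 ++ [block])
  else st

def rainbow_block_alt (blocks : List (List (List Int))) : List (List (List Int)) :=
  (blocks.foldl pvStepB (0, [])).2

-- ===== PRECONDITION & SPEC =====
-- Pre_ excludes blocks containing an empty cell, on which both Pythons raise IndexError (cell[-1]).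
def Pre_rainbow_block (blocks : List (List (List Int))) : Prop :=
  ∀ block ∈ blocks, ∀ cell ∈ block, cell ≠ []
instance (blocks : List (List (List Int))) : Decidable (Pre_rainbow_block blocks) := by unfold Pre_rainbow_block; infer_instance
def pvWitness_rainbow_block : List (List (List Int)) := [[[1, 0], [2]], [[0]], []]

def Spec_rainbow_block (blocks : List (List (List Int))) (out : List (List (List Int))) : Prop := out = rainbow_block_alt blocks
instance (blocks : List (List (List Int))) (out : List (List (List Int))) : Decidable (Spec_rainbow_block blocks out) := by unfold Spec_rainbow_block; infer_instance

-- ===== CLAIM =====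
def Claim_equal_rainbow_block : Prop := ∀ (blocks : List (List (List Int))), Dom_rainbow_block blocks → Pre_rainbow_block blocks → Spec_rainbow_block blocks (rainbow_block blocks)

-- ===== LEMMAS AND PROOFS =====

lemma cntB_acc (block : List (List Int)) (a : Nat) :
    block.foldl (fun c cell => if PySem.List.pyGet? cell (-1) == some 0 then c + 1 else c) a
      = a + pvCntA block := by
  unfold pvCntA
  induction block generalizing a with
  | nil => simp
  | cons c cs ih =>
    rw [List.foldl_cons, List.filter_cons]
    cases h : (PySem.List.pyGet? c (-1) == some 0)
    · rw [if_neg (by simp), if_neg (by simp), ih]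
    · rw [if_pos (by simp), if_pos (by simp), ih, List.length_cons]
      omega

lemma cnt_eq (block : List (List Int)) : pvCntB block = pvCntA block := by
  unfold pvCntB; rw [cntB_acc]; omega

-- the overall maximum A computes, parametric in the floor m
def pvMax (m : Nat) (blocks : List (List (List Int))) : Nat :=
  blocks.foldl (fun m b => max m (pvCntA b)) m

lemma maxA_eq (blocks : List (List (List Int))) (m : Nat) :
    blocks.foldl (fun m block => let z := pvCntA block; if z > m then z else m) m
      = pvMax m blocks := by
  unfold pvMax
  induction blocks generalizing m with
  | nil => rfl
  | cons b bs ih =>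
    simp only [List.foldl_cons]
    rw [ih]
    congr 1
    rw [Nat.max_def]
    split_ifs <;> omega

lemma pvMax_ge (blocks : List (List (List Int))) (m : Nat) : m ≤ pvMax m blocks := by
  unfold pvMax
  induction blocks generalizing m with
  | nil => simp
  | cons b bs ih => exact le_trans (Nat.le_max_left _ _) (ih _)

-- one unfolded step of the streaming pass
lemma step_eq (m : Nat) (ws : List (List (List Int))) (b : List (List Int)) :
    pvStepB (m, ws) b
      = if pvCntA b > m then (pvCntA b, [b])
        else if pvCntA b = m then (m, ws ++ [b]) else (m, ws) := by
  unfold pvStepB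
  rw [cnt_eq]

-- invariant of the streaming pass: final best is pvMax, winners are the kept prefix ++ filter
lemma stream_inv (blocks : List (List (List Int))) (m : Nat) (ws : List (List (List Int))) :
    blocks.foldl pvStepB (m, ws)
      = (pvMax m blocks,
         (if pvMax m blocks = m then ws else [])
           ++ blocks.filter (fun b => pvCntA b = pvMax m blocks)) := by
  induction blocks generalizing m ws with
  | nil => simp [pvMax]
  | cons b bs ih =>
    have hM : pvMax m (b :: bs) = pvMax (max m (pvCntA b)) bs := rfl
    rw [List.foldl_cons, step_eq, List.filter_cons, hM]
    by_cases h1 : pvCntA b > m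
    · rw [if_pos h1, ih]
      have hmx : max m (pvCntA b) = pvCntA b := by omega
      rw [hmx]
      have hge := pvMax_ge bs (pvCntA b)
      have hne : pvMax (pvCntA b) bs ≠ m := by omega
      by_cases h2 : pvCntA b = pvMax (pvCntA b) bs
      · rw [← h2]
        have h5 : ¬ pvCntA b = m := by omega
        simp [h5]
      · simp [h2, hne, Ne.symm h2]
    · have hmx : max m (pvCntA b) = m := by omega
      rw [hmx]
      have hge := pvMax_ge bs m
      by_cases h2 : pvCntA b = m
      · rw [if_neg h1, if_pos h2, ih]
        by_cases h3 : pvMax m bs = m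
        · simp [h3, h2.trans h3.symm]
        · have h4 : ¬ pvCntA b = pvMax m bs := by omega
          simp [h3, h4]
      · rw [if_neg h1, if_neg h2, ih]
        have h4 : ¬ pvCntA b = pvMax m bs := by omega
        simp [h4]

-- A's second pass is exactly the filter by the max
lemma filterA_eq (blocks : List (List (List Int))) (M : Nat) (acc : List (List (List Int))) :
    blocks.foldl (fun r block => if pvCntA block = M then r ++ [block] else r) acc
      = acc ++ blocks.filter (fun b => pvCntA b = M) := by
  induction blocks generalizing acc with
  | nil => simp
  | cons b bs ih =>
    simp only [List.foldl_cons, List.filter_cons]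
    by_cases h : pvCntA b = M <;> simp [h, ih]

-- ===== VERDICT =====
theorem rainbow_block_spec : Claim_equal_rainbow_block := by
  intro blocks _ _
  unfold Spec_rainbow_block rainbow_block rainbow_block_alt
  simp only
  rw [maxA_eq, filterA_eq, stream_inv]
  simp
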